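-- pv_equiv track=rewrite | github.com/Alectriciti/comfyui-adaptiveprompts | prompt_repack.py | _build_underscored_with_map
-- ===== SOURCE A (Python) =====
-- def _build_underscored_with_map(text: str):
--     """
--     Convert runs of whitespace to a single underscore, and build a mapping
--     from normalized index -> original index.
--     """
--     norm_chars = []
--     idx_map = []
--     i = 0
--     L = len(text)
--     while i < L:
--         ch = text[i]
--         if ch.isspace():
--             start = i
--             while i < L and text[i].isspace():
--                 i += 1
--             norm_chars.append("_")
--             idx_map.append(start)
--         else:
--             norm_chars.append(ch)
--             idx_map.append(i)
--             i += 1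
--     return "".join(norm_chars), idx_map
-- ===== SOURCE B (Python) =====
-- def _build_underscored_with_map(text: str):
--     norm_chars = []
--     idx_map = []
--     prev_ws = False
--     for i, ch in enumerate(text):
--         ws = ch.isspace()
--         if ws:
--             if not prev_ws:
--                 norm_chars.append("_")
--                 idx_map.append(i)
--         else:
--             norm_chars.append(ch)
--             idx_map.append(i)
--         prev_ws = ws
--     return "".join(norm_chars), idx_map
-- ===== Notes on version B (the rewrite author's own statement) =====
-- stated objective: simpler
-- what changed: Replaced the nested while loops (inner whitespace-skipping scan with manual index arithmetic) by a single for-loop over enumerate(text) maintaining one boolean flag recording whether the preceding character was whitespace, which decides whether a whitespace character starts a new run.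
import Mathlib
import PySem

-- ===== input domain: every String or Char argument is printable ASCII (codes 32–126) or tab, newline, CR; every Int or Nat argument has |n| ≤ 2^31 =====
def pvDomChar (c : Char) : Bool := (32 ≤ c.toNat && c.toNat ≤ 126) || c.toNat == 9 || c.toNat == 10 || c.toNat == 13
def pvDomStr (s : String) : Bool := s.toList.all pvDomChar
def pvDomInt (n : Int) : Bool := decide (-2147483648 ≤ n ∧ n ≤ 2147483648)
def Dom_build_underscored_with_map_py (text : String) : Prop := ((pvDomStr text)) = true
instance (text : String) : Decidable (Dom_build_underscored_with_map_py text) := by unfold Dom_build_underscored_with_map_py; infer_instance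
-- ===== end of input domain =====

-- B replaces A's nested while loops (inner whitespace-skipping scan) by one pass keeping a
-- 'previous char was whitespace' flag; same return value, objective: simpler.

-- ===== PORT A =====
-- inner 'while i < L and text[i].isspace(): i += 1' of A: returns (remaining chars, new i)
def pvSkipWS : List Char → Int → List Char × Int
  | [], i => ([], i)
  | c :: rest, i => if PySem.Chars.isspace c then pvSkipWS rest (i + 1) else (c :: rest, i)

theorem pvSkipWS_len_le (l : List Char) (i : Int) : (pvSkipWS l i).1.length ≤ l.length := by
  induction l generalizing i with
  | nil => simp [pvSkipWS]
  | cons c rest ih =>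
    simp only [pvSkipWS]
    split
    · exact le_trans (ih _) (Nat.le_succ _)
    · simp

-- outer while loop of A
def pvGoA : List Char → Int → List Char × List Int
  | [], _ => ([], [])
  | c :: rest, i =>
    if PySem.Chars.isspace c then
      let p := pvSkipWS rest (i + 1)
      let r := pvGoA p.1 p.2
      ('_' :: r.1, i :: r.2)
    else
      let r := pvGoA rest (i + 1)
      (c :: r.1, i :: r.2)
termination_by l => l.length
decreasing_by
  · exact Nat.lt_succ_of_le (pvSkipWS_len_le rest (i + 1))
  · simp

def build_underscored_with_map_py (text : String) : String × List Int :=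
  let r := pvGoA text.toList 0
  (String.mk r.1, r.2)

-- ===== PORT B =====
-- B's single for-loop over enumerate(text) with the prev_ws flag
def pvGoB : List Char → Int → Bool → List Char × List Int
  | [], _, _ => ([], [])
  | c :: rest, i, prev =>
    let ws := PySem.Chars.isspace c
    let r := pvGoB rest (i + 1) ws
    if ws then
      if prev then r else ('_' :: r.1, i :: r.2)
    else
      (c :: r.1, i :: r.2)

def build_underscored_with_map_py_alt (text : String) : String × List Int :=
  let r := pvGoB text.toList 0 false
  (String.mk r.1, r.2)

-- ===== PRECONDITION & SPEC =====
def Spec_build_underscored_with_map_py (text : String) (out : String × List Int) : Prop := out = build_underscored_with_map_py_alt text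
instance (text : String) (out : String × List Int) : Decidable (Spec_build_underscored_with_map_py text out) := by unfold Spec_build_underscored_with_map_py; infer_instance

-- ===== CLAIM (what is proved, stated in full; the proofs are below) =====
def Claim_equal_build_underscored_with_map_py : Prop := ∀ (text : String), Dom_build_underscored_with_map_py text → Spec_build_underscored_with_map_py text (build_underscored_with_map_py text)

-- ===== LEMMAS AND PROOFS =====

-- pvSkipWS stops at [] or a non-space head
theorem pvSkipWS_head (l : List Char) (i : Int) :
    (pvSkipWS l i).1 = [] ∨ ∃ c rest, (pvSkipWS l i).1 = c :: rest ∧ PySem.Chars.isspace c = false := by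
  induction l generalizing i with
  | nil => simp [pvSkipWS]
  | cons c rest ih =>
    simp only [pvSkipWS]
    split
    · exact ih _
    · exact Or.inr ⟨c, rest, rfl, by simp_all⟩

-- with the flag set, B skips a whitespace run exactly as A's inner while does
theorem pvGoB_skip (l : List Char) (i : Int) :
    pvGoB l i true = pvGoB (pvSkipWS l i).1 (pvSkipWS l i).2 true := by
  induction l generalizing i with
  | nil => simp [pvSkipWS]
  | cons c rest ih =>
    by_cases h : PySem.Chars.isspace c = true
    · simp only [pvGoB, pvSkipWS, h, if_pos]
      exact ih _
    · simp [pvGoB, pvSkipWS, h]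

-- the flag is irrelevant when the head is not whitespace (or the list is empty)
theorem pvGoB_flag_irrel (l : List Char) (i : Int)
    (h : l = [] ∨ ∃ c rest, l = c :: rest ∧ PySem.Chars.isspace c = false) :
    pvGoB l i true = pvGoB l i false := by
  rcases h with h | ⟨c, rest, rfl, hc⟩
  · subst h; rfl
  · simp [pvGoB, hc]

theorem pvGoA_eq_pvGoB (n : Nat) (l : List Char) (i : Int) (hn : l.length ≤ n) :
    pvGoA l i = pvGoB l i false := by
  induction n generalizing l i with
  | zero =>
    have : l = [] := List.eq_nil_of_length_eq_zero (Nat.le_zero.mp hn)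
    subst this; simp [pvGoA, pvGoB]
  | succ n ih =>
    cases l with
    | nil => simp [pvGoA, pvGoB]
    | cons c rest =>
      by_cases h : PySem.Chars.isspace c = true
      · simp only [pvGoA, pvGoB, h, if_true, Bool.false_eq_true, if_false]
        have hlen : (pvSkipWS rest (i + 1)).1.length ≤ n :=
          le_trans (pvSkipWS_len_le rest (i + 1)) (Nat.succ_le_succ_iff.mp hn)
        rw [pvGoB_skip, pvGoB_flag_irrel _ _ (pvSkipWS_head rest (i + 1)),
          ← ih _ _ hlen]
      · simp only [pvGoA, pvGoB, h]
        rw [ih rest (i + 1) (Nat.succ_le_succ_iff.mp hn)]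
        simp

-- ===== VERDICT (by name: the statement is the Claim_ definition above) =====
theorem build_underscored_with_map_py_spec : Claim_equal_build_underscored_with_map_py := by
  intro text _
  unfold Spec_build_underscored_with_map_py build_underscored_with_map_py build_underscored_with_map_py_alt
  rw [pvGoA_eq_pvGoB text.toList.length text.toList 0 le_rfl]
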